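-- pv_equiv track=rewrite | github.com/StefanoBavaro/TimedAntiAlignments | ATMG.py | gen_arcs_type2
-- ===== SOURCE A (Python) =====
-- def gen_arcs_type2(dimension):
--
--     arcs = []
--
--     last_p = 0
--     carry = 4
--
--     dim_copy =  dimension
--     if dimension%2 !=0:
--         dimension-=1
--     for i in range(0,dimension,2):
--         arcs.append(("p"+str(last_p), "t"+str(i)))
--         arcs.append(("p"+str(last_p+2), "t"+str(i)))
--         arcs.append(("t"+str(i), "p"+str(last_p+carry)))
--         arcs.append(("t"+str(i), "p"+str(last_p+carry+1)))
--
--         arcs.append(("p"+str(last_p+1), "t"+str(i+1)))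
--         arcs.append(("p"+str(last_p+3), "t"+str(i+1)))
--         arcs.append(("t"+str(i+1), "p"+str(last_p+carry+2)))
--         arcs.append(("t"+str(i+1), "p"+str(last_p+carry+3)))
--         last_p += carry
--
--     if dim_copy%2 !=0:
--         arcs.append(("p"+str(last_p), "t"+str(dim_copy-1)))
--         arcs.append(("p"+str(last_p+1), "t"+str(dim_copy-1)))
--         arcs.append(("p"+str(last_p+2), "t"+str(dim_copy-1)))
--         arcs.append(("p"+str(last_p+3), "t"+str(dim_copy-1)))
--         arcs.append(("t"+str(dim_copy-1), "p"+str(last_p+5)))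
--
--     return arcs
-- ===== SOURCE B (Python) =====
-- def gen_arcs_type2(dimension):
--     arcs = []
--     for t in range(dimension):
--         base = 2 * (t - t % 2)
--         if t == dimension - 1 and dimension % 2 != 0:
--             for k in range(4):
--                 arcs.append(("p" + str(base + k), "t" + str(t)))
--             arcs.append(("t" + str(t), "p" + str(base + 5)))
--         elif t % 2 == 0:
--             arcs.append(("p" + str(base), "t" + str(t)))
--             arcs.append(("p" + str(base + 2), "t" + str(t)))
--             arcs.append(("t" + str(t), "p" + str(base + 4)))
--             arcs.append(("t" + str(t), "p" + str(base + 5)))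
--         else:
--             arcs.append(("p" + str(base + 1), "t" + str(t)))
--             arcs.append(("p" + str(base + 3), "t" + str(t)))
--             arcs.append(("t" + str(t), "p" + str(base + 6)))
--             arcs.append(("t" + str(t), "p" + str(base + 7)))
--     return arcs
-- ===== Notes on version B (the rewrite author's own statement) =====
-- stated objective: simpler
-- what changed: Replaces A's step-2 pair loop with its last_p/carry accumulator and post-loop tail by a single per-transition loop over range(dimension) that computes each place base in closed form as 2*(t - t%2) and handles the odd final transition inside the loop.
-- intended difference: On negative odd dimensions A skips its loop yet still emits a degenerate tail transition with a negative index (e.g. gen_arcs_type2(-1) = [('p0','t-2'),('p1','t-2'),('p2','t-2'),('p3','t-2'),('t-2','p5')]); B returns [] there, the intended result for a non-positive dimension. — e.g. on gen_arcs_type2(-1): A returns [("p0", "t-2"), ("p1", "t-2"), ("p2", "t-2"), ("p3", "t-2"), ("t-2", "p5")], B returns []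
import Mathlib
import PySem

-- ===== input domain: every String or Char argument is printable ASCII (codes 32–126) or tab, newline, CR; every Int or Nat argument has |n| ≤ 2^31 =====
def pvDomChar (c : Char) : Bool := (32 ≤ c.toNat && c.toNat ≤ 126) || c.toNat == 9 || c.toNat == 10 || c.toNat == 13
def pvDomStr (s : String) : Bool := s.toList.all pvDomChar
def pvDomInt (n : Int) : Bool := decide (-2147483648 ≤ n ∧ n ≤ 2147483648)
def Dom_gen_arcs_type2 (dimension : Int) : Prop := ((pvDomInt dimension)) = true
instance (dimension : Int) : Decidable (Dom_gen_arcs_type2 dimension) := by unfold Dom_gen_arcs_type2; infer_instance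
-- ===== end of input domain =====

-- B replaces A's last_p/carry accumulator and step-2 pair loop by a per-transition loop with a
-- closed-form place base 2*(t - t%2) (objective: simpler decomposition, no speed claim).
-- On negative odd dimensions A's leftover loop state still emits a degenerate tail transition; B emits nothing there (see D_).

-- ===== PORT A =====
def gen_arcs_type2_step (carry : Int) (st : List (String × String) × Int) (i : Int) :
    List (String × String) × Int :=
  let arcs := st.1
  let last_p := st.2
  let arcs := arcs ++ [("p" ++ PySem.Int.toStr last_p, "t" ++ PySem.Int.toStr i)]
  let arcs := arcs ++ [("p" ++ PySem.Int.toStr (last_p + 2), "t" ++ PySem.Int.toStr i)]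
  let arcs := arcs ++ [("t" ++ PySem.Int.toStr i, "p" ++ PySem.Int.toStr (last_p + carry))]
  let arcs := arcs ++ [("t" ++ PySem.Int.toStr i, "p" ++ PySem.Int.toStr (last_p + carry + 1))]
  let arcs := arcs ++ [("p" ++ PySem.Int.toStr (last_p + 1), "t" ++ PySem.Int.toStr (i + 1))]
  let arcs := arcs ++ [("p" ++ PySem.Int.toStr (last_p + 3), "t" ++ PySem.Int.toStr (i + 1))]
  let arcs := arcs ++ [("t" ++ PySem.Int.toStr (i + 1), "p" ++ PySem.Int.toStr (last_p + carry + 2))]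
  let arcs := arcs ++ [("t" ++ PySem.Int.toStr (i + 1), "p" ++ PySem.Int.toStr (last_p + carry + 3))]
  (arcs, last_p + carry)

def gen_arcs_type2 (dimension : Int) : List (String × String) :=
  let carry : Int := 4
  let dim_copy : Int := dimension
  let dimension : Int := if PySem.Int.mod dimension 2 ≠ 0 then dimension - 1 else dimension
  let st := (PySem.List.pyRange 0 dimension 2).foldl (gen_arcs_type2_step carry) ([], 0)
  let arcs := st.1
  let last_p := st.2
  if PySem.Int.mod dim_copy 2 ≠ 0 then
    let arcs := arcs ++ [("p" ++ PySem.Int.toStr last_p, "t" ++ PySem.Int.toStr (dim_copy - 1))]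
    let arcs := arcs ++ [("p" ++ PySem.Int.toStr (last_p + 1), "t" ++ PySem.Int.toStr (dim_copy - 1))]
    let arcs := arcs ++ [("p" ++ PySem.Int.toStr (last_p + 2), "t" ++ PySem.Int.toStr (dim_copy - 1))]
    let arcs := arcs ++ [("p" ++ PySem.Int.toStr (last_p + 3), "t" ++ PySem.Int.toStr (dim_copy - 1))]
    let arcs := arcs ++ [("t" ++ PySem.Int.toStr (dim_copy - 1), "p" ++ PySem.Int.toStr (last_p + 5))]
    arcs
  else arcs

-- ===== PORT B =====
def gen_arcs_type2_alt_step (dimension : Int) (arcs : List (String × String)) (t : Int) :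
    List (String × String) :=
  let base := 2 * (t - PySem.Int.mod t 2)
  if t = dimension - 1 ∧ PySem.Int.mod dimension 2 ≠ 0 then
    let arcs := (PySem.List.pyRange 0 4 1).foldl
      (fun a k => a ++ [("p" ++ PySem.Int.toStr (base + k), "t" ++ PySem.Int.toStr t)]) arcs
    arcs ++ [("t" ++ PySem.Int.toStr t, "p" ++ PySem.Int.toStr (base + 5))]
  else if PySem.Int.mod t 2 = 0 then
    arcs ++ [("p" ++ PySem.Int.toStr base, "t" ++ PySem.Int.toStr t),
             ("p" ++ PySem.Int.toStr (base + 2), "t" ++ PySem.Int.toStr t),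
             ("t" ++ PySem.Int.toStr t, "p" ++ PySem.Int.toStr (base + 4)),
             ("t" ++ PySem.Int.toStr t, "p" ++ PySem.Int.toStr (base + 5))]
  else
    arcs ++ [("p" ++ PySem.Int.toStr (base + 1), "t" ++ PySem.Int.toStr t),
             ("p" ++ PySem.Int.toStr (base + 3), "t" ++ PySem.Int.toStr t),
             ("t" ++ PySem.Int.toStr t, "p" ++ PySem.Int.toStr (base + 6)),
             ("t" ++ PySem.Int.toStr t, "p" ++ PySem.Int.toStr (base + 7))]

def gen_arcs_type2_alt (dimension : Int) : List (String × String) :=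
  (PySem.List.pyRange 0 dimension 1).foldl (gen_arcs_type2_alt_step dimension) []

-- ===== PRECONDITION & SPEC =====
-- On negative odd dimensions A skips the loop but, from the leftover initial state last_p = 0, still
-- emits a degenerate tail transition ("t" with a negative index) on places p0..p3/p5; B emits no
-- arcs for a negative dimension, which is the intended behaviour.
-- (Lean's `%` on Int agrees with Python's `%` for the positive divisor 2.)
def D_gen_arcs_type2 (dimension : Int) : Prop :=
  dimension < 0 ∧ dimension % 2 ≠ 0
instance (dimension : Int) : Decidable (D_gen_arcs_type2 dimension) := by
  unfold D_gen_arcs_type2; infer_instance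

def Spec_gen_arcs_type2 (dimension : Int) (out : List (String × String)) : Prop :=
  ¬ D_gen_arcs_type2 dimension → out = gen_arcs_type2_alt dimension
instance (dimension : Int) (out : List (String × String)) : Decidable (Spec_gen_arcs_type2 dimension out) := by
  unfold Spec_gen_arcs_type2; infer_instance

def pvDiffWitness_gen_arcs_type2 : Int := -1
def pvDiffWitnessOut_gen_arcs_type2 : (List (String × String)) × (List (String × String)) :=
  ([("p0", "t-2"), ("p1", "t-2"), ("p2", "t-2"), ("p3", "t-2"), ("t-2", "p5")], [])

-- ===== CLAIM (what is proved, stated in full; the proofs are below) =====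
def Claim_unchanged_gen_arcs_type2 : Prop :=
  ∀ (dimension : Int), Dom_gen_arcs_type2 dimension →
    Spec_gen_arcs_type2 dimension (gen_arcs_type2 dimension)
def Claim_changed_gen_arcs_type2 : Prop :=
  Dom_gen_arcs_type2 (pvDiffWitness_gen_arcs_type2) ∧
  D_gen_arcs_type2 (pvDiffWitness_gen_arcs_type2) ∧
  gen_arcs_type2 (pvDiffWitness_gen_arcs_type2) = pvDiffWitnessOut_gen_arcs_type2.1 ∧
  gen_arcs_type2_alt (pvDiffWitness_gen_arcs_type2) = pvDiffWitnessOut_gen_arcs_type2.2 ∧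
  pvDiffWitnessOut_gen_arcs_type2.1 ≠ pvDiffWitnessOut_gen_arcs_type2.2
def Claim_exact_gen_arcs_type2 : Prop :=
  ∀ (dimension : Int), Dom_gen_arcs_type2 dimension → D_gen_arcs_type2 dimension →
    gen_arcs_type2 dimension ≠ gen_arcs_type2_alt dimension

-- ===== LEMMAS AND PROOFS =====

def pvBlk (j : Nat) : List (String × String) :=
  [("p" ++ PySem.Int.toStr (4*(j:Int)), "t" ++ PySem.Int.toStr (2*(j:Int))),
   ("p" ++ PySem.Int.toStr (4*(j:Int)+2), "t" ++ PySem.Int.toStr (2*(j:Int))),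
   ("t" ++ PySem.Int.toStr (2*(j:Int)), "p" ++ PySem.Int.toStr (4*(j:Int)+4)),
   ("t" ++ PySem.Int.toStr (2*(j:Int)), "p" ++ PySem.Int.toStr (4*(j:Int)+5)),
   ("p" ++ PySem.Int.toStr (4*(j:Int)+1), "t" ++ PySem.Int.toStr (2*(j:Int)+1)),
   ("p" ++ PySem.Int.toStr (4*(j:Int)+3), "t" ++ PySem.Int.toStr (2*(j:Int)+1)),
   ("t" ++ PySem.Int.toStr (2*(j:Int)+1), "p" ++ PySem.Int.toStr (4*(j:Int)+6)),
   ("t" ++ PySem.Int.toStr (2*(j:Int)+1), "p" ++ PySem.Int.toStr (4*(j:Int)+7))]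

def pvTail (m : Nat) : List (String × String) :=
  [("p" ++ PySem.Int.toStr (4*(m:Int)), "t" ++ PySem.Int.toStr (2*(m:Int))),
   ("p" ++ PySem.Int.toStr (4*(m:Int)+1), "t" ++ PySem.Int.toStr (2*(m:Int))),
   ("p" ++ PySem.Int.toStr (4*(m:Int)+2), "t" ++ PySem.Int.toStr (2*(m:Int))),
   ("p" ++ PySem.Int.toStr (4*(m:Int)+3), "t" ++ PySem.Int.toStr (2*(m:Int))),
   ("t" ++ PySem.Int.toStr (2*(m:Int)), "p" ++ PySem.Int.toStr (4*(m:Int)+5))]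

lemma pvMod2 (a : Int) : PySem.Int.mod a 2 = a % 2 :=
  PySem.Int.mod_eq_emod_of_pos (by omega)

lemma pvStepA_eq (acc : List (String × String)) (j : Nat) :
    gen_arcs_type2_step 4 (acc, 4*(j:Int)) (2*(j:Int)) = (acc ++ pvBlk j, 4*(j:Int)+4) := by
  simp only [gen_arcs_type2_step, pvBlk, List.append_assoc, List.singleton_append]
  norm_num
  ring_nf
  simp

lemma pvLoopA_spec (m : Nat) :
    ((List.range m).map (fun j : Nat => 2*(j:Int))).foldl (gen_arcs_type2_step 4) ([], 0) =
      ((List.range m).flatMap pvBlk, 4*(m:Int)) := by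
  induction m with
  | zero => simp
  | succ m ih =>
    rw [List.range_succ, List.map_append, List.foldl_append, ih, List.flatMap_append]
    simp only [List.map_cons, List.map_nil, List.foldl_cons, List.foldl_nil,
      List.flatMap_cons, List.flatMap_nil, List.append_nil]
    rw [pvStepA_eq]
    simp only [Prod.mk.injEq]
    refine ⟨trivial, by push_cast; ring⟩

lemma pvStepB_even (d : Int) (acc : List (String × String)) (m : Nat) (h : 2*(m:Int) + 2 ≤ d) :
    gen_arcs_type2_alt_step d acc (2*(m:Int)) = acc ++ (pvBlk m).take 4 := by
  have hm : PySem.Int.mod (2*(m:Int)) 2 = 0 := by rw [pvMod2]; omega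
  have hcond : ¬ ((2*(m:Int)) = d - 1 ∧ PySem.Int.mod d 2 ≠ 0) := by
    rintro ⟨he, ho⟩
    rw [pvMod2] at ho; omega
  simp only [gen_arcs_type2_alt_step, hm, if_neg hcond]
  norm_num [pvBlk]
  ring_nf
  simp

lemma pvStepB_odd (d : Int) (acc : List (String × String)) (m : Nat) (h : 2*(m:Int) + 2 ≤ d) :
    gen_arcs_type2_alt_step d acc (2*(m:Int)+1) = acc ++ (pvBlk m).drop 4 := by
  have hm : PySem.Int.mod (2*(m:Int)+1) 2 = 1 := by rw [pvMod2]; omega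
  have hcond : ¬ ((2*(m:Int)+1) = d - 1 ∧ PySem.Int.mod d 2 ≠ 0) := by
    rintro ⟨he, ho⟩
    rw [pvMod2] at ho; omega
  simp only [gen_arcs_type2_alt_step, hm, if_neg hcond]
  norm_num [pvBlk]
  ring_nf
  simp

lemma pvLoopB_spec (d : Int) (m : Nat) (h : 2*(m:Int) ≤ d) :
    ((List.range (2*m)).map (fun k : Nat => (k:Int))).foldl (gen_arcs_type2_alt_step d) [] =
      (List.range m).flatMap pvBlk := by
  induction m with
  | zero => simp
  | succ m ih =>
    have h' : 2*(m:Int) ≤ d := by push_cast at h ⊢; omega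
    have e : 2*(m+1) = (2*m) + 1 + 1 := by ring
    rw [e, List.range_succ, List.range_succ, List.map_append, List.map_append,
      List.foldl_append, List.foldl_append, ih h', List.range_succ, List.flatMap_append]
    simp only [List.map_cons, List.map_nil, List.foldl_cons, List.foldl_nil,
      List.flatMap_cons, List.flatMap_nil, List.append_nil]
    have c1 : ((2*m : Nat) : Int) = 2*(m:Int) := by push_cast; ring
    have c2 : ((2*m+1 : Nat) : Int) = 2*(m:Int)+1 := by push_cast; ring
    rw [c1, c2, pvStepB_even d _ m (by push_cast at h ⊢; omega),
      pvStepB_odd d _ m (by push_cast at h ⊢; omega), List.append_assoc, List.take_append_drop]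

lemma pvRangeA (m : Nat) :
    PySem.List.pyRange 0 (2*(m:Int)) 2 = (List.range m).map (fun j : Nat => 2*(j:Int)) := by
  rw [PySem.List.pyRange_of_pos 0 (2*(m:Int)) (by omega)]
  have e : (if (0:Int) < 2*(m:Int) then ((2*(m:Int) - 0 + 2 - 1)/2).toNat else 0) = m := by
    split <;> omega
  rw [e]
  simp

lemma pvA_even (m : Nat) : gen_arcs_type2 (2*(m:Int)) = (List.range m).flatMap pvBlk := by
  have hm : PySem.Int.mod (2*(m:Int)) 2 = 0 := by rw [pvMod2]; omega
  simp only [gen_arcs_type2, hm]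
  norm_num
  rw [pvRangeA, pvLoopA_spec]

lemma pvA_odd (m : Nat) :
    gen_arcs_type2 (2*(m:Int)+1) = (List.range m).flatMap pvBlk ++ pvTail m := by
  have hm : PySem.Int.mod (2*(m:Int)+1) 2 = 1 := by rw [pvMod2]; omega
  simp only [gen_arcs_type2, hm]
  norm_num
  rw [pvRangeA, pvLoopA_spec]
  simp only [pvTail]

lemma pvB_even (m : Nat) : gen_arcs_type2_alt (2*(m:Int)) = (List.range m).flatMap pvBlk := by
  have hr : PySem.List.pyRange 0 (2*(m:Int)) 1 = (List.range (2*m)).map (fun k : Nat => (k:Int)) := by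
    rw [PySem.List.pyRange_one]
    have e : ((2*(m:Int) - 0).toNat) = 2*m := by omega
    rw [e]
    simp
  simp only [gen_arcs_type2_alt]
  rw [hr, pvLoopB_spec _ m (le_refl _)]

lemma pvB_odd (m : Nat) :
    gen_arcs_type2_alt (2*(m:Int)+1) = (List.range m).flatMap pvBlk ++ pvTail m := by
  have hr : PySem.List.pyRange 0 (2*(m:Int)+1) 1 =
      (List.range (2*m)).map (fun k : Nat => (k:Int)) ++ [2*(m:Int)] := by
    rw [PySem.List.pyRange_one]
    have e : ((2*(m:Int)+1 - 0).toNat) = 2*m+1 := by omega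
    rw [e, List.range_succ]
    simp
  simp only [gen_arcs_type2_alt]
  rw [hr, List.foldl_append, pvLoopB_spec _ m (by omega)]
  simp only [List.foldl_cons, List.foldl_nil]
  have hm0 : PySem.Int.mod (2*(m:Int)) 2 = 0 := by rw [pvMod2]; omega
  have hm1 : PySem.Int.mod (2*(m:Int)+1) 2 = 1 := by rw [pvMod2]; omega
  have hcond : (2*(m:Int)) = (2*(m:Int)+1) - 1 ∧ PySem.Int.mod (2*(m:Int)+1) 2 ≠ 0 := by
    refine ⟨by ring, by rw [hm1]; omega⟩
  simp only [gen_arcs_type2_alt_step, if_pos hcond, hm0]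
  rw [show PySem.List.pyRange 0 4 1 = [0, 1, 2, 3] from rfl]
  simp only [List.foldl_cons, List.foldl_nil, List.append_assoc, List.singleton_append]
  simp only [pvTail]
  norm_num
  ring_nf
  simp

lemma pvB_neg (d : Int) (h : d < 0) : gen_arcs_type2_alt d = [] := by
  simp only [gen_arcs_type2_alt]
  rw [PySem.List.pyRange_one_eq_nil (by omega)]
  rfl

-- ===== VERDICT (by name: the statement is the Claim_ definition above) =====
theorem gen_arcs_type2_spec : Claim_unchanged_gen_arcs_type2 := by
  intro d _ hnd
  simp only [D_gen_arcs_type2, not_and_or] at hnd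
  by_cases h0 : 0 ≤ d
  · rcases Int.even_or_odd d with ⟨m, hm⟩ | ⟨m, hm⟩
    · obtain ⟨k, rfl⟩ : ∃ k : Nat, m = (k:Int) := ⟨m.toNat, by omega⟩
      rw [show d = 2*((k:Nat):Int) by omega, pvA_even, pvB_even]
    · obtain ⟨k, rfl⟩ : ∃ k : Nat, m = (k:Int) := ⟨m.toNat, by omega⟩
      rw [show d = 2*((k:Nat):Int)+1 by omega, pvA_odd, pvB_odd]
  · have hd2 : d % 2 = 0 := by
      rcases hnd with h | h
      · omega
      · omega
    have hm : PySem.Int.mod d 2 = 0 := by rw [pvMod2]; omega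
    rw [pvB_neg d (by omega)]
    simp only [gen_arcs_type2, hm]
    norm_num
    rw [PySem.List.pyRange_of_pos 0 d (by omega), if_neg (by omega)]
    simp

theorem gen_arcs_type2_changed : Claim_changed_gen_arcs_type2 := by
  unfold Claim_changed_gen_arcs_type2
  refine ⟨by decide, by decide, ?_, ?_, by decide⟩
  · rfl
  · rfl

theorem gen_arcs_type2_tight : Claim_exact_gen_arcs_type2 := by
  intro d _ hd
  obtain ⟨hneg, hodd⟩ := hd
  rw [pvB_neg d (by omega)]
  have hm : PySem.Int.mod d 2 ≠ 0 := by rw [pvMod2]; omega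
  simp only [gen_arcs_type2, if_pos hm]
  simp
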